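-- pv_equiv track=rewrite | github.com/dnrobin/pylayout | pylayout/utils.py | dict_at
-- ===== SOURCE A (Python) =====
-- def dict_at(d: dict, i: int):
--     n = i
--     if i < 0:
--         n = len(d) + i
--     for k, v in enumerate(d.values()):
--         if k == n:
--             return v
--     raise IndexError("Index %i out of range in dictionary!" % i)
-- ===== SOURCE B (Python) =====
-- def dict_at(d: dict, i: int):
--     values = list(d.values())
--     try:
--         return values[i]
--     except IndexError:
--         raise IndexError("Index %i out of range in dictionary!" % i)
-- ===== Notes on version B (the rewrite author's own statement) =====
-- stated objective: simpler
-- what changed: B builds the values list once and uses Python's native (negative-capable) list indexing instead of A's enumerate scan with manual len(d)+i arithmetic; the IndexError message is preserved.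
import Mathlib
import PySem

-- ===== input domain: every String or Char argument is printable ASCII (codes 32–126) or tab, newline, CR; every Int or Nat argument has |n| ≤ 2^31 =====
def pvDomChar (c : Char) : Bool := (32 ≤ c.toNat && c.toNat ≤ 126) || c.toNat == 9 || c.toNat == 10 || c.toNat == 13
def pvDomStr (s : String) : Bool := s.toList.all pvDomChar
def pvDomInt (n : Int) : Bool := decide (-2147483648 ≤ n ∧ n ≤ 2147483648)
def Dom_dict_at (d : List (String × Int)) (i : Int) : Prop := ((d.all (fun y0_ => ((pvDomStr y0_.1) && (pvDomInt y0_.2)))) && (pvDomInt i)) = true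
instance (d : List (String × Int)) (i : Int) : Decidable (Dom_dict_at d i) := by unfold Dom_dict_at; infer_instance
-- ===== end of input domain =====

-- B returns the i-th dict value by direct (negative-capable) indexing into the values list,
-- instead of A's enumerate scan with manual len(d)+i arithmetic; equivalence on the return value.

-- ===== PORT A =====
-- the 'for k, v in enumerate(d.values()): if k == n: return v' loop
def dictAtFind : List (Int × Int) → Int → Option Int
  | [], _ => none
  | (k, v) :: rest, n => if k = n then some v else dictAtFind rest n

def dict_at (d : List (String × Int)) (i : Int) : Int :=
  let n : Int := if i < 0 then (d.length : Int) + i else i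
  (dictAtFind (PySem.List.enumerate (d.map (·.2))) n).get!


-- ===== PORT B =====
def dict_at_alt (d : List (String × Int)) (i : Int) : Int :=
  let values := d.map (·.2)
  (PySem.List.pyGet? values i).get!

-- ===== PRECONDITION & SPEC =====
-- A raises IndexError when i is out of range of the dict's length; those inputs are excluded.
def Pre_dict_at (d : List (String × Int)) (i : Int) : Prop :=
  PySem.Raise.InRange d.length i
instance (d : List (String × Int)) (i : Int) : Decidable (Pre_dict_at d i) := by
  unfold Pre_dict_at; infer_instance

def pvWitness_dict_at : (List (String × Int)) × Int := ([("a", 1), ("b", 2)], -1)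

def Spec_dict_at (d : List (String × Int)) (i : Int) (out : Int) : Prop := out = dict_at_alt d i
instance (d : List (String × Int)) (i : Int) (out : Int) : Decidable (Spec_dict_at d i out) := by
  unfold Spec_dict_at; infer_instance

-- ===== CLAIM (what is proved, stated in full; the proofs are below) =====
def Claim_equal_dict_at : Prop := ∀ (d : List (String × Int)) (i : Int), Dom_dict_at d i → Pre_dict_at d i → Spec_dict_at d i (dict_at d i)

-- ===== LEMMAS AND PROOFS =====

-- the enumerate scan is positional lookup at index n - s
lemma dictAtFind_enumerate (vs : List Int) (s n : Int) (hs : s ≤ n) :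
    dictAtFind (PySem.List.enumerate vs s) n = vs[(n - s).toNat]? := by
  induction vs generalizing s with
  | nil => simp [PySem.List.enumerate_nil, dictAtFind]
  | cons x xs ih =>
    rw [PySem.List.enumerate_cons]
    by_cases h : s = n
    · subst h
      simp [dictAtFind]
    · have h1 : s + 1 ≤ n := by omega
      have h2 : (n - s).toNat = (n - (s + 1)).toNat + 1 := by omega
      simp only [dictAtFind, if_neg h, ih (s + 1) h1, h2, List.getElem?_cons_succ]

lemma pyGet?_neg_case (vs : List Int) (i : Int) (h0 : i < 0) (h1 : 0 ≤ (vs.length : Int) + i) :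
    PySem.List.pyGet? vs i = vs[((vs.length : Int) + i).toNat]? := by
  simp only [PySem.List.pyGet?, PySem.List.pyIdx?, if_neg (by omega : ¬ (0 ≤ i)),
    if_pos (by omega : -(vs.length : Int) ≤ i), Option.bind_some]
  congr 1
  omega

theorem dict_at_spec : Claim_equal_dict_at := by
  intro d i _ hpre
  unfold Spec_dict_at dict_at dict_at_alt
  simp only []
  have hlen : (d.map (·.2)).length = d.length := by simp
  unfold Pre_dict_at PySem.Raise.InRange at hpre
  by_cases h : i < 0
  · rw [if_pos h, dictAtFind_enumerate _ 0 _ (by omega),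
      pyGet?_neg_case _ _ h (by omega), hlen]
    congr 2
    omega
  · rw [if_neg h, dictAtFind_enumerate _ 0 _ (by omega),
      PySem.List.pyGet?_of_nonneg _ (by omega)]
    congr 2
    omega
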